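-- pv_equiv track=rewrite | github.com/ethanish/AVR_UNO_TESTBED | Tutorials/P2/tests/p2_logic_test.py | simulate_ticks
-- ===== SOURCE A (Python) =====
-- def simulate_ticks(n: int, rate10: int = 10, rate100: int = 100):
--     t1 = 0
--     t10 = 0
--     t100 = 0
--     a10 = 0
--     a100 = 0
--     for tick_ms in range(1, n + 1):
--         t1 += 1
--         a10 += 1
--         a100 += 1
--         if a10 >= rate10:
--             t10 += 1
--             a10 = 0
--         if a100 >= rate100:
--             t100 += 1
--             a100 = 0
--     return t1, t10, t100
-- ===== SOURCE B (Python) =====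
-- def simulate_ticks(n: int, rate10: int = 10, rate100: int = 100):
--     # Closed form: the loop runs max(n, 0) ticks; a counter with threshold r
--     # fires every max(r, 1) ticks (a non-positive or 1 threshold fires every tick).
--     m = max(n, 0)
--     return m, m // max(rate10, 1), m // max(rate100, 1)
-- ===== Notes on version B (the rewrite author's own statement) =====
-- stated objective: faster
-- what changed: Replaced the O(n) tick-by-tick simulation loop with a closed form: m ticks with a threshold-r counter fire exactly m // max(r,1) times, so B returns (max(n,0), m//max(rate10,1), m//max(rate100,1)) in O(1).
import Mathlib
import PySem

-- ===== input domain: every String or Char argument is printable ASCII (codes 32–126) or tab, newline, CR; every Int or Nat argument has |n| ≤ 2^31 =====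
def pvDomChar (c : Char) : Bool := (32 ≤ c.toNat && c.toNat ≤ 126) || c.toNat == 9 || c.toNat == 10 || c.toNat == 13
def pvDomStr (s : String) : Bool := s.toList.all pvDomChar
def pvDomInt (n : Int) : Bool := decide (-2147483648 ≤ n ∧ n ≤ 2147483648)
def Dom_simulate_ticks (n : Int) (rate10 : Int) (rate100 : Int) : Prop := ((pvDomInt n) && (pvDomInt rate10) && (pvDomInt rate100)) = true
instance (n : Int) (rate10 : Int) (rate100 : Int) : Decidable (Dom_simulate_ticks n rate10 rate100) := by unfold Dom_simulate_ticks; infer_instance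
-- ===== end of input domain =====

-- B replaces A's O(n) per-tick simulation loop with an O(1) closed form (floor divisions).

-- ===== PORT A =====
-- one loop iteration of A: state = (t1, t10, t100, a10, a100)
def simulate_ticks_step (rate10 rate100 : Int)
    (s : Int × Int × Int × Int × Int) : Int × Int × Int × Int × Int :=
  let t1 := s.1 + 1
  let a10 := s.2.2.2.1 + 1
  let a100 := s.2.2.2.2 + 1
  let (t10, a10) := if a10 ≥ rate10 then (s.2.1 + 1, (0 : Int)) else (s.2.1, a10)
  let (t100, a100) := if a100 ≥ rate100 then (s.2.2.1 + 1, (0 : Int)) else (s.2.2.1, a100)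
  (t1, t10, t100, a10, a100)

def simulate_ticks (n : Int) (rate10 : Int) (rate100 : Int) : List Int :=
  let s := (PySem.List.pyRange 1 (n + 1) 1).foldl
    (fun s _tick_ms => simulate_ticks_step rate10 rate100 s) (0, 0, 0, 0, 0)
  [s.1, s.2.1, s.2.2.1]

-- ===== PORT B =====
def simulate_ticks_alt (n : Int) (rate10 : Int) (rate100 : Int) : List Int :=
  let m := max n 0
  [m, PySem.Int.floordiv m (max rate10 1), PySem.Int.floordiv m (max rate100 1)]

-- ===== PRECONDITION & SPEC =====
def Spec_simulate_ticks (n : Int) (rate10 : Int) (rate100 : Int) (out : List Int) : Prop := out = simulate_ticks_alt n rate10 rate100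
instance (n : Int) (rate10 : Int) (rate100 : Int) (out : List Int) : Decidable (Spec_simulate_ticks n rate10 rate100 out) := by unfold Spec_simulate_ticks; infer_instance

-- ===== CLAIM (what is proved, stated in full; the proofs are below) =====
def Claim_equal_simulate_ticks : Prop := ∀ (n : Int) (rate10 : Int) (rate100 : Int), Dom_simulate_ticks n rate10 rate100 → Spec_simulate_ticks n rate10 rate100 (simulate_ticks n rate10 rate100)

-- ===== LEMMAS AND PROOFS =====

-- one tick of a single counter with threshold `rate`: from (count, accum) = (k/r, k%r)
-- (r = max rate 1) it moves to ((k+1)/r, (k+1)%r).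
theorem tick_counter (rate k : Int) (_hk : 0 ≤ k) :
    (if k % max rate 1 + 1 ≥ rate then (k / max rate 1 + 1, (0 : Int))
     else (k / max rate 1, k % max rate 1 + 1))
      = ((k + 1) / max rate 1, (k + 1) % max rate 1) := by
  by_cases hr : rate ≤ 1
  · have h1 : max rate 1 = 1 := by omega
    simp only [h1, Int.emod_one, Int.ediv_one, ge_iff_le]
    rw [if_pos (by omega : rate ≤ 0 + 1)]
  · have h1 : max rate 1 = rate := by omega
    have hrp : 0 < rate := by omega
    have hm0 : 0 ≤ k % rate := Int.emod_nonneg k (by omega)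
    have hml : k % rate < rate := Int.emod_lt_of_pos k hrp
    have hkd : rate * (k / rate) + k % rate = k := Int.mul_ediv_add_emod k rate
    by_cases hc : k % rate + 1 ≥ rate
    · have hm : k % rate = rate - 1 := by omega
      have hk1 : k + 1 = (k / rate + 1) * rate := by linarith [hkd]
      simp only [h1, if_pos hc, hk1]
      rw [Int.mul_ediv_cancel _ (by omega), Int.mul_emod_left]
    · have h := (Int.ediv_emod_unique (a := k + 1) (q := k / rate)
        (r := k % rate + 1) hrp).mpr ⟨by linarith [hkd], by omega, by omega⟩
      simp only [h1, if_neg hc, h.1, h.2]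

-- loop invariant: after k ticks the state is (k, k/r10, k/r100, k%r10, k%r100)
theorem simulate_ticks_loop (rate10 rate100 : Int) (k : Nat) :
    (PySem.List.pyRange 1 (1 + (k : Int)) 1).foldl
        (fun s _tick_ms => simulate_ticks_step rate10 rate100 s) (0, 0, 0, 0, 0)
      = ((k : Int), (k : Int) / max rate10 1, (k : Int) / max rate100 1,
         (k : Int) % max rate10 1, (k : Int) % max rate100 1) := by
  induction k with
  | zero =>
    rw [PySem.List.pyRange_one_eq_nil (by omega)]
    simp
  | succ k ih =>
    have hsplit : PySem.List.pyRange 1 (1 + ((k : Int) + 1)) 1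
        = PySem.List.pyRange 1 (1 + (k : Int)) 1 ++ [1 + (k : Int)] := by
      have := PySem.List.pyRange_one_succ_right (a := 1) (b := 1 + (k : Int)) (by omega)
      rw [show (1 : Int) + ((k : Int) + 1) = (1 + (k : Int)) + 1 by ring, this]
    push_cast
    rw [hsplit, List.foldl_append]
    push_cast at ih
    rw [ih]
    simp only [List.foldl_cons, List.foldl_nil, simulate_ticks_step]
    have h10 := tick_counter rate10 (k : Int) (Int.natCast_nonneg k)
    have h100 := tick_counter rate100 (k : Int) (Int.natCast_nonneg k)
    simp only [ge_iff_le] at h10 h100 ⊢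
    rw [h10, h100]

-- ===== VERDICT (by name: the statement is the Claim_ definition above) =====
theorem simulate_ticks_spec : Claim_equal_simulate_ticks := by
  intro n rate10 rate100 _
  unfold Spec_simulate_ticks simulate_ticks simulate_ticks_alt
  dsimp only
  have hr10 : (0 : Int) < max rate10 1 := by omega
  have hr100 : (0 : Int) < max rate100 1 := by omega
  rw [PySem.Int.floordiv_eq_ediv_of_pos hr10, PySem.Int.floordiv_eq_ediv_of_pos hr100]
  by_cases hn : n ≤ 0
  · rw [PySem.List.pyRange_one_eq_nil (by omega : n + 1 ≤ 1)]
    simp [show max n 0 = 0 by omega]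
  · have hk : n = ((n.toNat : Int)) := by omega
    have := simulate_ticks_loop rate10 rate100 n.toNat
    rw [show n + 1 = 1 + ((n.toNat : Int)) by omega, this]
    simp [show max n 0 = n by omega, hk.symm]
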